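-- pv_equiv track=rewrite | github.com/RShoose/numpy_tests | Unit_2/merged_task.py | analyze_web_logs
-- ===== SOURCE A (Python) =====
-- from collections import Counter, defaultdict
--
-- def analyze_web_logs(logs):
--     """
--     Анализирует список логов веб-сайта, возвращая информацию о количестве посещений каждого URL,
--     а также о количестве уникальных пользователей (IP-адресов) по каждому URL.
--
--     :param logs: список кортежей (IP-адрес, URL)
--     :return: tuple из двух словарей:
--         1. Словарь с количеством посещений каждого URL.
--         2. Словарь с количеством уникальных IP-адресов по каждому URL.
--     """
--     url_visits = Counter()        # Счетчик посещений URL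
--     unique_ips_per_url = defaultdict(set)  # defaultdict для отслеживания уникальных IP по URL
--
--     # Проходим по каждому логу и агрегируем данные
--     for ip, url in logs:
--         # Учет посещений URL
--         url_visits[url] += 1
--
--         # Добавление IP в множество уникальных IP по данному URL
--         unique_ips_per_url[url].add(ip)
--
--     # Получаем количество уникальных IP-адресов по каждому URL
--     unique_ip_counts = {url: len(ips) for url, ips in unique_ips_per_url.items()}
--
--     return url_visits, unique_ip_counts
-- ===== SOURCE B (Python) =====
-- from collections import Counter
--
-- def analyze_web_logs(logs):
--     # Phase 1: collect the distinct URLs in first-occurrence order.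
--     urls = []
--     for _, url in logs:
--         if url not in urls:
--             urls.append(url)
--     # Phase 2: for each URL, scan the whole log to count its hits and its distinct IPs.
--     url_visits = Counter({u: sum(1 for _, v in logs if v == u) for u in urls})
--     unique_ip_counts = {u: len({ip for ip, v in logs if v == u}) for u in urls}
--     return url_visits, unique_ip_counts
-- ===== Notes on version B (the rewrite author's own statement) =====
-- stated objective: alternative
-- what changed: A aggregates everything in one pass (incrementing a Counter and growing a per-URL IP set per log line); B first collects the distinct URLs in order and then answers each URL by a separate scan of the whole log (per-key brute-force aggregation, O(n*u) instead of O(n)).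
import Mathlib
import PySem

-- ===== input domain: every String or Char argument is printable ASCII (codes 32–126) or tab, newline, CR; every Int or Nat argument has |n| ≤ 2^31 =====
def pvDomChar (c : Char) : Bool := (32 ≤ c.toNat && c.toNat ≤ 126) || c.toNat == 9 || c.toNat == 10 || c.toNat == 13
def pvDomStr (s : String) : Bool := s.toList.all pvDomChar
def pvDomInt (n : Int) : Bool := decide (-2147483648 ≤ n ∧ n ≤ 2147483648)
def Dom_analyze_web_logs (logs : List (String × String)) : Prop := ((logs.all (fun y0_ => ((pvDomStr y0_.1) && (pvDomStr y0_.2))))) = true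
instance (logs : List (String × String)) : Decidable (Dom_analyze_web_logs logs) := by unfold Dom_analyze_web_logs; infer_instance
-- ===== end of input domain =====

-- B replaces A's single-pass aggregation by a two-phase scheme: collect distinct URLs, then one scan of the log per URL (alternative; same results, higher cost O(n*u)).
-- ===== PORT A =====
def analyze_web_logs (logs : List (String × String)) : (List (String × Int)) × (List (String × Int)) :=
  let st := logs.foldl
    (fun (st : PySem.Dict String Int × PySem.Dict String (PySem.Set String)) p =>
      (st.1.modify p.2 0 (· + 1),
       st.2.modify p.2 PySem.Set.empty (fun s => PySem.Set.add s p.1)))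
    (PySem.Dict.empty, PySem.Dict.empty)
  (st.1.items, st.2.items.map (fun p => (p.1, (p.2.length : Int))))

-- ===== PORT B =====
def analyze_web_logs_alt (logs : List (String × String)) : (List (String × Int)) × (List (String × Int)) :=
  let urls := logs.foldl (fun acc p => if acc.contains p.2 then acc else acc ++ [p.2]) []
  (urls.map (fun u => (u, ((logs.countP (fun p => p.2 == u)) : Int))),
   urls.map (fun u => (u, ((PySem.Set.ofList ((logs.filter (fun p => p.2 == u)).map Prod.fst)).length : Int))))

-- ===== PRECONDITION & SPEC =====
def Spec_analyze_web_logs (logs : List (String × String)) (out : (List (String × Int)) × (List (String × Int))) : Prop := out = analyze_web_logs_alt logs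
instance (logs : List (String × String)) (out : (List (String × Int)) × (List (String × Int))) : Decidable (Spec_analyze_web_logs logs out) := by unfold Spec_analyze_web_logs; infer_instance

-- ===== CLAIM (what is proved, stated in full; the proofs are below) =====
def Claim_equal_analyze_web_logs : Prop := ∀ (logs : List (String × String)), Dom_analyze_web_logs logs → Spec_analyze_web_logs logs (analyze_web_logs logs)

-- ===== LEMMAS AND PROOFS =====

/-- Map a function over the values of a dict (proof device only). -/
def mapVal {ν ν' : Type} (g : ν → ν') (d : PySem.Dict String ν) : PySem.Dict String ν' :=
  PySem.Dict.mk (d.items.map (fun p => (p.1, g p.2)))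

theorem contains_mapVal {ν ν' : Type} (g : ν → ν') (d : PySem.Dict String ν) (k : String) :
    (mapVal g d).contains k = d.contains k := by
  simp [mapVal, PySem.Dict.contains, Function.comp_def]

theorem getD_mapVal {ν ν' : Type} (g : ν → ν') (d : PySem.Dict String ν) (k : String) (d0 : ν) :
    (mapVal g d).getD k (g d0) = g (d.getD k d0) := by
  simp only [mapVal, PySem.Dict.getD, PySem.Dict.get?, List.find?_map,
    Function.comp_def]
  cases h : List.find? (fun p => p.1 == k) d.items <;> simp_all

theorem modify_mapVal {ν ν' : Type} (g : ν → ν') (d : PySem.Dict String ν)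
    (k : String) (d0 : ν) (f : ν → ν) (f' : ν' → ν')
    (hf : ∀ v, f' (g v) = g (f v)) :
    (mapVal g d).modify k (g d0) f' = mapVal g (d.modify k d0 f) := by
  simp only [PySem.Dict.modify, getD_mapVal, hf, PySem.Dict.insert, contains_mapVal]
  split
  · apply PySem.Dict.ext
    simp only [mapVal, List.map_map]
    apply List.map_congr_left
    intro p _
    by_cases h : p.1 == k <;> simp [Function.comp, h]
  · apply PySem.Dict.ext
    simp [mapVal]

theorem set_add_ofList (l : List String) (x : String) :
    PySem.Set.add (PySem.Set.ofList l) x = PySem.Set.ofList (l ++ [x]) := by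
  simp [PySem.Set.ofList_eq_foldl, List.foldl_append]

/-- The grouping dict url -> list of IPs (proof device; appears in neither port). -/
def groupIPs (logs : List (String × String)) : PySem.Dict String (List String) :=
  logs.foldl (fun d p => d.modify p.2 [] (· ++ [p.1])) PySem.Dict.empty

/-- Loop invariant: A's two dicts are the value-wise images of the grouping dict. -/
theorem loop_inv (logs : List (String × String)) :
    ∀ m : PySem.Dict String (List String),
      logs.foldl
        (fun (st : PySem.Dict String Int × PySem.Dict String (PySem.Set String)) p =>
          (st.1.modify p.2 0 (· + 1),
           st.2.modify p.2 PySem.Set.empty (fun s => PySem.Set.add s p.1)))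
        (mapVal (fun l => (l.length : Int)) m, mapVal PySem.Set.ofList m)
      = (mapVal (fun l => (l.length : Int))
           (logs.foldl (fun d p => d.modify p.2 [] (· ++ [p.1])) m),
         mapVal PySem.Set.ofList
           (logs.foldl (fun d p => d.modify p.2 [] (· ++ [p.1])) m)) := by
  induction logs with
  | nil => intro m; rfl
  | cons p t ih =>
    intro m
    have h1 : (mapVal (fun l => (l.length : Int)) m).modify p.2 ((0 : Int)) (· + 1)
        = mapVal (fun l => (l.length : Int)) (m.modify p.2 [] (· ++ [p.1])) := by
      have := modify_mapVal (fun l => (l.length : Int)) m p.2 [] (· ++ [p.1])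
        (· + 1) (by intro v; simp)
      simpa using this
    have h2 : (mapVal PySem.Set.ofList m).modify p.2 PySem.Set.empty
          (fun s => PySem.Set.add s p.1)
        = mapVal PySem.Set.ofList (m.modify p.2 [] (· ++ [p.1])) := by
      have := modify_mapVal PySem.Set.ofList m p.2 [] (· ++ [p.1])
        (fun s => PySem.Set.add s p.1) (by intro v; exact set_add_ofList v p.1)
      simpa [PySem.Set.empty, PySem.Set.ofList] using this
    simp only [List.foldl_cons, h1, h2]
    exact ih _

theorem keys_groupIPs (logs : List (String × String)) :
    (groupIPs logs).keys = PySem.Set.ofList (logs.map Prod.snd) := by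
  rw [groupIPs, PySem.Dict.keys_foldl_modify_key]
  simp [PySem.Set.update, PySem.Set.ofList_eq_foldl]

theorem nodup_keys_groupIPs (logs : List (String × String)) :
    (groupIPs logs).keys.Nodup := by
  exact PySem.Dict.nodup_keys_foldl_modify_key logs Prod.snd [] (fun d p => (· ++ [p.1]))
    PySem.Dict.empty (by simp [PySem.Dict.keys_empty])

theorem getD_groupIPs (logs : List (String × String)) (u : String) :
    (groupIPs logs).getD u [] = (logs.filter (fun p => p.2 == u)).map Prod.fst := by
  have hswap : groupIPs logs
      = (logs.map Prod.swap).foldl (fun d p => d.modify p.1 [] (· ++ [p.2])) PySem.Dict.empty := by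
    rw [List.foldl_map]; rfl
  rw [hswap, PySem.Dict.getD_foldl_modify_append]
  simp [List.filter_map, List.map_map, Function.comp_def, Prod.swap]

theorem items_groupIPs (logs : List (String × String)) :
    (groupIPs logs).items
      = (PySem.Set.ofList (logs.map Prod.snd)).map
          (fun u => (u, (logs.filter (fun p => p.2 == u)).map Prod.fst)) := by
  rw [PySem.Dict.items_eq_map_keys _ (nodup_keys_groupIPs logs) [], keys_groupIPs]
  exact List.map_congr_left (fun u _ => by rw [getD_groupIPs])

theorem urls_eq (logs : List (String × String)) :
    logs.foldl (fun acc p => if acc.contains p.2 then acc else acc ++ [p.2]) []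
      = PySem.Set.ofList (logs.map Prod.snd) := by
  rw [PySem.Set.ofList_eq_foldl, List.foldl_map]
  simp [PySem.Set.add, PySem.Set.contains]

-- ===== VERDICT (by name: the statement is the Claim_ definition above) =====
theorem analyze_web_logs_spec : Claim_equal_analyze_web_logs := by
  intro logs _
  unfold Spec_analyze_web_logs analyze_web_logs analyze_web_logs_alt
  have hinv := loop_inv logs PySem.Dict.empty
  rw [show mapVal (fun l => (l.length : Int)) (PySem.Dict.empty : PySem.Dict String (List String))
        = PySem.Dict.empty from rfl,
      show mapVal PySem.Set.ofList (PySem.Dict.empty : PySem.Dict String (List String))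
        = PySem.Dict.empty from rfl] at hinv
  rw [hinv]
  have hitems : (groupIPs logs).items
      = (PySem.Set.ofList (logs.map Prod.snd)).map
          (fun u => (u, (logs.filter (fun p => p.2 == u)).map Prod.fst)) := items_groupIPs logs
  simp only [groupIPs] at hitems
  simp only [mapVal, hitems, urls_eq, List.map_map, Function.comp_def,
    List.length_map]
  refine Prod.ext ?_ rfl
  exact List.map_congr_left (fun u _ => by simp [List.countP_eq_length_filter])
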